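-- pv_equiv track=rewrite | github.com/cmdowney88/Chonker | chonker/chonktorch/functions.py | sort_unsort_pmts
-- ===== SOURCE A (Python) =====
-- def sort_unsort_pmts(lst, descending=False):
--     """
--     Return the permutation used to sort a list, as well as the permutation
--     necessary to restore it to its original order
--     """
--
--     sort_zip = list(zip(lst, [x for x in range(len(lst))]))
--     sort_zip.sort(key=lambda x: x[0], reverse=descending)
--     sort_pmt = [x[1] for x in sort_zip]
--     unsort_zip = list(zip(sort_pmt, [x for x in range(len(sort_pmt))]))
--     unsort_zip.sort(key=lambda x: x[0])
--     unsort_pmt = [x[1] for x in unsort_zip]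
--     return sort_pmt, unsort_pmt
-- ===== SOURCE B (Python) =====
-- def sort_unsort_pmts(lst, descending=False):
--     """
--     Same sort permutation as before, but the unsort permutation is obtained by
--     inverting sort_pmt directly in one pass instead of a second sort.
--     """
--     sort_pmt = [i for _, i in
--                 sorted(zip(lst, range(len(lst))), key=lambda x: x[0], reverse=descending)]
--     unsort_pmt = [0] * len(sort_pmt)
--     for i, p in enumerate(sort_pmt):
--         unsort_pmt[p] = i
--     return sort_pmt, unsort_pmt
-- ===== Notes on version B (the rewrite author's own statement) =====
-- stated objective: alternative
-- what changed: The unsort permutation is computed by directly inverting sort_pmt (unsort_pmt[p] = i in one linear pass) instead of zipping sort_pmt with indices and sorting it a second time.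
import Mathlib
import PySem

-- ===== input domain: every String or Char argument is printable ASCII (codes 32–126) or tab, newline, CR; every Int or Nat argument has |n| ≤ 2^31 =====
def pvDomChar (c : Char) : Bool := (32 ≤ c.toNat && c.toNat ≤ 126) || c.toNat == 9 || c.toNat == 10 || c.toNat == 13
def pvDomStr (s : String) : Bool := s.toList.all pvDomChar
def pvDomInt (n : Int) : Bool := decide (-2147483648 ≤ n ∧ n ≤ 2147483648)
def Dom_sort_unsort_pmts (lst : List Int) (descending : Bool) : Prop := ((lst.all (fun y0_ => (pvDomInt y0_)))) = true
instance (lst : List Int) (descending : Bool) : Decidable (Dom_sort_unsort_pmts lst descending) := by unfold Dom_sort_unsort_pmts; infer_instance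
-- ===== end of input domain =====

-- B computes the unsort permutation by inverting sort_pmt in one linear pass instead of sorting a second time.


-- ===== PORT A =====
def sort_unsort_pmts (lst : List Int) (descending : Bool) : List Int × List Int :=
  let sort_zip := lst.zip (PySem.List.pyRange 0 (lst.length : Int) 1)
  let sort_zip := PySem.List.sorted sort_zip (fun x => x.1) descending
  let sort_pmt := sort_zip.map (fun x => x.2)
  let unsort_zip := sort_pmt.zip (PySem.List.pyRange 0 (sort_pmt.length : Int) 1)
  let unsort_zip := PySem.List.sorted unsort_zip (fun x => x.1)
  let unsort_pmt := unsort_zip.map (fun x => x.2)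
  (sort_pmt, unsort_pmt)

-- ===== PORT B =====
-- The list assignment unsort_pmt[p] = i is ported as List.set p.toNat; this is exact here because
-- every p in sort_pmt is a nonnegative in-range index (sort_pmt is a permutation of 0..n-1).
def sort_unsort_pmts_alt (lst : List Int) (descending : Bool) : List Int × List Int :=
  let sort_pmt := (PySem.List.sorted (lst.zip (PySem.List.pyRange 0 (lst.length : Int) 1))
      (fun x => x.1) descending).map (fun x => x.2)
  let unsort_pmt := (PySem.List.enumerate sort_pmt 0).foldl
      (fun u ip => u.set ip.2.toNat ip.1) (List.replicate sort_pmt.length 0)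
  (sort_pmt, unsort_pmt)

-- ===== PRECONDITION & SPEC =====
def Spec_sort_unsort_pmts (lst : List Int) (descending : Bool) (out : List Int × List Int) : Prop := out = sort_unsort_pmts_alt lst descending
instance (lst : List Int) (descending : Bool) (out : List Int × List Int) : Decidable (Spec_sort_unsort_pmts lst descending out) := by unfold Spec_sort_unsort_pmts; infer_instance

-- ===== CLAIM (what is proved, stated in full; the proofs are below) =====
def Claim_equal_sort_unsort_pmts : Prop := ∀ (lst : List Int) (descending : Bool), Dom_sort_unsort_pmts lst descending → Spec_sort_unsort_pmts lst descending (sort_unsort_pmts lst descending)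

-- ===== LEMMAS AND PROOFS =====

-- membership in `s` zipped with its index range: exactly the pairs (s[i], i)
lemma mem_zip_range (s : List Int) (p : Int × Int) :
    p ∈ s.zip (PySem.List.pyRange 0 (s.length : Int) 1) ↔
      ∃ i : Nat, ∃ h : i < s.length, s[i] = p.1 ∧ p.2 = (i : Int) := by
  have hr : (PySem.List.pyRange 0 (s.length : Int) 1).length = s.length := by
    simp [PySem.List.length_pyRange_one]
  constructor
  · intro hp
    rcases List.mem_iff_getElem.mp hp with ⟨i, hi, he⟩
    have hi' : i < s.length := by
      simpa [List.length_zip, hr] using hi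
    refine ⟨i, hi', ?_, ?_⟩
    · rw [← he, List.getElem_zip]
    · rw [← he, List.getElem_zip]
      simp [PySem.List.getElem_pyRange_one]
  · rintro ⟨i, hi, h1, h2⟩
    have hiz : i < (s.zip (PySem.List.pyRange 0 (s.length : Int) 1)).length := by
      simp [List.length_zip, hr]; omega
    refine List.mem_iff_getElem.mpr ⟨i, hiz, ?_⟩
    have := List.getElem_zip (h := hiz)
    rw [this]
    have : (PySem.List.pyRange 0 (s.length : Int) 1)[i]'(by omega) = (i : Int) := by
      simp [PySem.List.getElem_pyRange_one]
    rw [this, h1, ← h2]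

-- the foldl of index assignments, fully characterised via getElem?
lemma foldl_set_getElem? (s : List Int) (hnd : s.Nodup)
    (hb : ∀ x ∈ s, 0 ≤ x) :
    ∀ (c : Int) (u : List Int), (∀ x ∈ s, x.toNat < u.length) →
    ∀ j : Nat,
      ((PySem.List.enumerate s c).foldl (fun u ip => u.set ip.2.toNat ip.1) u)[j]?
        = if (j : Int) ∈ s then some (c + (s.idxOf (j : Int) : Int)) else u[j]? := by
  induction s with
  | nil =>
    intro c u _ j
    simp [PySem.List.enumerate]
  | cons a t ih =>
    intro c u hlen j
    rcases List.nodup_cons.mp hnd with ⟨hna, hnt⟩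
    have h0a : 0 ≤ a := hb a (by simp)
    rw [PySem.List.enumerate_cons]
    simp only [List.foldl_cons]
    rw [ih hnt (fun x hx => hb x (List.mem_cons_of_mem _ hx)) (c + 1) (u.set a.toNat c)
        (fun x hx => by simpa using hlen x (List.mem_cons_of_mem _ hx)) j]
    by_cases hjt : (j : Int) ∈ t
    · have hja : (j : Int) ≠ a := fun h => hna (h ▸ hjt)
      have hstep : List.idxOf (j : Int) (a :: t) = (List.idxOf (j : Int) t) + 1 := by
        simpa using List.idxOf_cons_ne t (Ne.symm hja)
      rw [if_pos hjt, if_pos (List.mem_cons_of_mem _ hjt), hstep]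
      congr 1
      push_cast
      ring
    · by_cases hje : (j : Int) = a
      · have hjn : j = a.toNat := by omega
        have hidx0 : List.idxOf (j : Int) (a :: t) = 0 := by
          rw [hje]; exact List.idxOf_cons_self
        rw [if_neg hjt, if_pos (by simp [hje]), hidx0, List.getElem?_set]
        have hlt : a.toNat < u.length := hlen a (by simp)
        simp [hjn, hlt]
      · have hnm : ¬ ((j : Int) ∈ a :: t) := by simp [hje, hjt]
        rw [if_neg hjt, if_neg hnm, List.getElem?_set]
        have : a.toNat ≠ j := fun h => hje (by omega)
        simp [this]

-- core: for s a permutation of range(n), A's second sort equals B's inversion pass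
lemma unsort_eq (s : List Int) (n : Nat)
    (hperm : s.Perm (PySem.List.pyRange 0 (n : Int) 1)) :
    (PySem.List.sorted (s.zip (PySem.List.pyRange 0 (s.length : Int) 1))
        (fun x => x.1)).map (fun x => x.2)
      = (PySem.List.enumerate s 0).foldl (fun u ip => u.set ip.2.toNat ip.1)
          (List.replicate s.length 0) := by
  have hlen : s.length = n := by
    have := hperm.length_eq
    simpa [PySem.List.length_pyRange_one] using this
  have hnd : s.Nodup := hperm.nodup_iff.mpr (PySem.List.nodup_pyRange_one 0 (n : Int))
  have hmem : ∀ x : Int, x ∈ s ↔ 0 ≤ x ∧ x < (n : Int) := by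
    intro x
    rw [hperm.mem_iff, PySem.List.mem_pyRange_one]
  -- the sorted zip, named explicitly
  set T : List (Int × Int) :=
    (PySem.List.pyRange 0 (s.length : Int) 1).map
      (fun k => (k, (List.idxOf k s : Int))) with hT
  have hsorted : PySem.List.sorted (s.zip (PySem.List.pyRange 0 (s.length : Int) 1))
      (fun x => x.1) = T := by
    apply PySem.List.sorted_eq_of_perm_of_pairwise_lt
    · -- T.Perm (zip)
      have hndz : (s.zip (PySem.List.pyRange 0 (s.length : Int) 1)).Nodup := by
        apply List.Nodup.of_map Prod.snd
        rw [List.map_snd_zip (by simp [PySem.List.length_pyRange_one])]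
        exact PySem.List.nodup_pyRange_one _ _
      have hndT : T.Nodup := by
        rw [hT]
        exact (PySem.List.nodup_pyRange_one _ _).map
          (fun x y h => congrArg Prod.fst h)
      rw [List.perm_ext_iff_of_nodup hndT hndz]
      intro p
      rw [mem_zip_range, hT, List.mem_map]
      constructor
      · rintro ⟨k, hk, rfl⟩
        have hks : k ∈ s := by
          rw [hmem]
          have := PySem.List.mem_pyRange_one.mp hk
          omega
        have hidx : List.idxOf k s < s.length := List.idxOf_lt_length_iff.mpr hks
        exact ⟨List.idxOf k s, hidx, List.getElem_idxOf hidx, rfl⟩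
      · rintro ⟨i, hi, h1, h2⟩
        refine ⟨p.1, ?_, ?_⟩
        · rw [PySem.List.mem_pyRange_one]
          have : p.1 ∈ s := h1 ▸ List.getElem_mem hi
          have := (hmem p.1).mp this
          omega
        · have : List.idxOf p.1 s = i := by
            rw [← h1]
            exact List.Nodup.idxOf_getElem hnd i hi
          rw [this, ← h2]
    · -- strictly increasing keys
      rw [hT]
      exact (PySem.List.pairwise_lt_pyRange_one 0 (s.length : Int)).map _
        (fun a b h => h)
  rw [hsorted]
  -- now compare elementwise with the foldl
  apply List.ext_getElem?
  intro j
  rw [foldl_set_getElem? s hnd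
      (fun x hx => ((hmem x).mp hx).1) 0 (List.replicate s.length 0)
      (fun x hx => by
        have := (hmem x).mp hx
        simp only [List.length_replicate]
        omega) j]
  by_cases hj : j < s.length
  · have hjm : (j : Int) ∈ s := by rw [hmem]; omega
    have hjr : j < (PySem.List.pyRange 0 (s.length : Int) 1).length := by
      simp [PySem.List.length_pyRange_one]; omega
    rw [if_pos hjm, List.getElem?_map, List.getElem?_map,
        List.getElem?_eq_getElem hjr]
    simp [PySem.List.getElem_pyRange_one]
  · have hjm : ¬ ((j : Int) ∈ s) := by rw [hmem]; omega
    rw [if_neg hjm, List.getElem?_map, List.getElem?_map,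
        List.getElem?_eq_none (by simp [PySem.List.length_pyRange_one]; omega),
        List.getElem?_eq_none (by simp; omega)]
    rfl

-- ===== VERDICT (by name: the statement is the Claim_ definition above) =====
theorem sort_unsort_pmts_spec : Claim_equal_sort_unsort_pmts := by
  intro lst descending _
  unfold Spec_sort_unsort_pmts
  simp only [sort_unsort_pmts, sort_unsort_pmts_alt]
  have hperm : ((PySem.List.sorted (lst.zip (PySem.List.pyRange 0 (lst.length : Int) 1))
      (fun x => x.1) descending).map (fun x => x.2)).Perm
      (PySem.List.pyRange 0 (lst.length : Int) 1) := by
    have h1 := ((PySem.List.sorted_perm (lst.zip (PySem.List.pyRange 0 (lst.length : Int) 1))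
      (fun x => x.1) descending).map (fun x => x.2))
    rwa [List.map_snd_zip (by simp [PySem.List.length_pyRange_one])] at h1
  exact Prod.ext rfl (unsort_eq _ lst.length hperm)
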